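-- pv_equiv track=rewrite | github.com/corca-ai/everland | games/ladder/game.py | format_ladder
-- ===== SOURCE A (Python) =====
-- def format_ladder(
--     n: int,
--     n_rows: int,
--     rungs: list[tuple[int, int]],
--     col_labels: list[str],
-- ) -> str:
--     """사다리 텍스트 아트 생성."""
--     rung_set = set(rungs)
--     lines: list[str] = []
--
--     # 상단 번호 (각 열 간격 4칸: |   |   |)
--     header = "".join(f"{i + 1:<4}" for i in range(n - 1)) + str(n)
--     lines.append(header)
--
--     # 사다리 본체
--     for row in range(n_rows):
--         row_rungs = {c for r, c in rung_set if r == row}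
--         segs = ["|"]
--         for col in range(n - 1):
--             segs.append("---|" if col in row_rungs else "   |")
--         lines.append("".join(segs))
--
--     # 하단 결과 레이블
--     footer_parts = []
--     for label in col_labels:
--         # 4칸 너비로 맞추되, 레이블이 길면 잘라서 표시
--         footer_parts.append(f"{label:<4}")
--     lines.append("".join(footer_parts).rstrip())
--
--     return "\n".join(lines)
-- ===== SOURCE B (Python) =====
-- def format_ladder(
--     n: int,
--     n_rows: int,
--     rungs: list[tuple[int, int]],
--     col_labels: list[str],
-- ) -> str:
--     header = "".join(f"{i + 1:<4}" for i in range(n - 1)) + str(n)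
--     # table-stamping: build the whole body grid, then stamp each rung once
--     grid = [["|"] + ["   |"] * (n - 1) for _ in range(n_rows)]
--     for r, c in rungs:
--         if 0 <= r < n_rows and 0 <= c < n - 1:
--             grid[r][c + 1] = "---|"
--     lines = [header] + ["".join(row) for row in grid]
--     footer = "".join(f"{label:<4}" for label in col_labels)
--     lines.append(footer.rstrip())
--     return "\n".join(lines)
-- ===== Notes on version B (the rewrite author's own statement) =====
-- stated objective: alternative
-- what changed: B builds the whole body as a mutable grid of cell strings and stamps '---|' once per rung (with a bounds guard), instead of A's per-row set comprehension and per-cell membership scan; header/footer are built the same way.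
import Mathlib
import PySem

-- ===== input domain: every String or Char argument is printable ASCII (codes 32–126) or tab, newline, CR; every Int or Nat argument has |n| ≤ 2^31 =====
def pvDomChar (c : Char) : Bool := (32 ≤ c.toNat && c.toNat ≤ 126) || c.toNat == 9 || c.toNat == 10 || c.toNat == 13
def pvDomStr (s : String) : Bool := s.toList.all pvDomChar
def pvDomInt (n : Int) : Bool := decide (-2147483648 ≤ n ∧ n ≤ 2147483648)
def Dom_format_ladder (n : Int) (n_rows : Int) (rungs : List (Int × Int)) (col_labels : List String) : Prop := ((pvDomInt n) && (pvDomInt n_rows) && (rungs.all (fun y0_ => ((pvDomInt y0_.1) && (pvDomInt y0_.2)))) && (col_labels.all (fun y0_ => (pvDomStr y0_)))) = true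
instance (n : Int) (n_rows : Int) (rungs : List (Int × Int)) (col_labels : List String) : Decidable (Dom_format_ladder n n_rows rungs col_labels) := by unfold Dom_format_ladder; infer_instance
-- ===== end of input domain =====

-- B replaces A's per-row set comprehension + per-cell membership scan by stamping each rung
-- once into a pre-built grid of cell strings (alternative decomposition, same cost).

-- f"{s:<4}": left-justify to width 4 (exact for the ASCII domain: Python pads by character count)
def pvPad4 (s : String) : String := String.ofList (s.toList ++ List.replicate (4 - s.toList.length) ' ')

-- ===== PORT A =====
def format_ladder (n : Int) (n_rows : Int) (rungs : List (Int × Int)) (col_labels : List String) : String :=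
  let rung_set : PySem.Set (Int × Int) := PySem.Set.ofList rungs
  let header : String :=
    PySem.Str.join "" ((PySem.List.pyRange 0 (n - 1) 1).map (fun i => pvPad4 (PySem.Int.toStr (i + 1))))
      ++ PySem.Int.toStr n
  let body : List String :=
    (PySem.List.pyRange 0 n_rows 1).map (fun row =>
      let row_rungs : PySem.Set Int :=
        PySem.Set.ofList ((rung_set.filter (fun p => p.1 == row)).map (fun p => p.2))
      PySem.Str.join "" ("|" :: (PySem.List.pyRange 0 (n - 1) 1).map (fun col =>
        if PySem.Set.contains row_rungs col then "---|" else "   |")))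
  let footer : String := PySem.Str.rstrip (PySem.Str.join "" (col_labels.map (fun label => pvPad4 label)))
  PySem.Str.join "\n" (header :: body ++ [footer])

-- ===== PORT B =====
def format_ladder_alt (n : Int) (n_rows : Int) (rungs : List (Int × Int)) (col_labels : List String) : String :=
  let header : String :=
    PySem.Str.join "" ((PySem.List.pyRange 0 (n - 1) 1).map (fun i => pvPad4 (PySem.Int.toStr (i + 1))))
      ++ PySem.Int.toStr n
  let grid0 : List (List String) :=
    List.replicate n_rows.toNat ("|" :: List.replicate (n - 1).toNat "   |")
  let grid : List (List String) :=
    rungs.foldl (fun g p =>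
      if 0 ≤ p.1 ∧ p.1 < n_rows ∧ 0 ≤ p.2 ∧ p.2 < n - 1 then
        g.set p.1.toNat ((g.getD p.1.toNat []).set (p.2.toNat + 1) "---|")
      else g) grid0
  let lines : List String := header :: grid.map (fun row => PySem.Str.join "" row)
  let footer : String := PySem.Str.join "" (col_labels.map (fun label => pvPad4 label))
  PySem.Str.join "\n" (lines ++ [PySem.Str.rstrip footer])

-- ===== PRECONDITION & SPEC =====
def Spec_format_ladder (n : Int) (n_rows : Int) (rungs : List (Int × Int)) (col_labels : List String) (out : String) : Prop := out = format_ladder_alt n n_rows rungs col_labels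
instance (n : Int) (n_rows : Int) (rungs : List (Int × Int)) (col_labels : List String) (out : String) : Decidable (Spec_format_ladder n n_rows rungs col_labels out) := by unfold Spec_format_ladder; infer_instance

-- ===== CLAIM (what is proved, stated in full; the proofs are below) =====
def Claim_equal_format_ladder : Prop := ∀ (n : Int) (n_rows : Int) (rungs : List (Int × Int)) (col_labels : List String), Dom_format_ladder n n_rows rungs col_labels → Spec_format_ladder n n_rows rungs col_labels (format_ladder n n_rows rungs col_labels)

-- ===== LEMMAS AND PROOFS =====

-- the "logical" grid: cell (r, c) is stamped iff f r c
def pvGrid (n n_rows : Int) (f : Nat → Nat → Bool) : List (List String) :=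
  (List.range n_rows.toNat).map (fun r =>
    "|" :: (List.range (n - 1).toNat).map (fun c => if f r c then "---|" else "   |"))

theorem pvGrid_congr {n n_rows : Int} {f g : Nat → Nat → Bool}
    (h : ∀ r < n_rows.toNat, ∀ c < (n - 1).toNat, f r c = g r c) :
    pvGrid n n_rows f = pvGrid n n_rows g := by
  unfold pvGrid
  refine List.map_congr_left ?_
  intro r hr
  simp only [List.mem_range] at hr
  refine congrArg _ (List.map_congr_left ?_)
  intro c hc
  simp only [List.mem_range] at hc
  rw [h r hr c hc]

theorem pvGrid_zero (n n_rows : Int) :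
    List.replicate n_rows.toNat ("|" :: List.replicate (n - 1).toNat ("   |" : String))
      = pvGrid n n_rows (fun _ _ => false) := by
  simp [pvGrid, List.map_const']

theorem pvGrid_stamp (n n_rows : Int) (f : Nat → Nat → Bool) (p : Int × Int) :
    (if 0 ≤ p.1 ∧ p.1 < n_rows ∧ 0 ≤ p.2 ∧ p.2 < n - 1 then
        (pvGrid n n_rows f).set p.1.toNat
          (((pvGrid n n_rows f).getD p.1.toNat []).set (p.2.toNat + 1) "---|")
      else pvGrid n n_rows f)
    = pvGrid n n_rows (fun r c => f r c || decide (p = ((r : Int), (c : Int)))) := by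
  by_cases hb : 0 ≤ p.1 ∧ p.1 < n_rows ∧ 0 ≤ p.2 ∧ p.2 < n - 1
  · rw [if_pos hb]
    obtain ⟨h1, h2, h3, h4⟩ := hb
    have hr : p.1.toNat < n_rows.toNat := by omega
    have hc : p.2.toNat < (n - 1).toNat := by omega
    have hget : (pvGrid n n_rows f).getD p.1.toNat []
        = "|" :: (List.range (n - 1).toNat).map (fun c => if f p.1.toNat c then "---|" else "   |") := by
      unfold pvGrid
      rw [List.getD_eq_getElem _ _ (by simpa using hr)]
      simp
    rw [hget]
    apply List.ext_getElem
    · simp [pvGrid]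
    intro r hrl hrl'
    simp only [pvGrid, List.length_map, List.length_range] at hrl hrl' ⊢
    rw [List.getElem_set]
    by_cases hrp : p.1.toNat = r
    · rw [if_pos hrp]
      simp only [List.getElem_map, List.getElem_range]
      subst hrp
      rw [List.set_cons_succ]
      refine congrArg _ ?_
      apply List.ext_getElem
      · simp
      intro c hcl hcl'
      simp only [List.length_map, List.length_range] at hcl hcl'
      rw [List.getElem_set]
      simp only [List.getElem_map, List.getElem_range, Int.ofNat_toNat]
      by_cases hcp : p.2.toNat = c
      · rw [if_pos hcp]
        have hp : p = (max p.1 0, ((c : Nat) : Int)) := by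
          obtain ⟨a, b⟩ := p
          simp only [Prod.mk.injEq] at hcp ⊢
          constructor <;> omega
        rw [hp]
        simp
      · rw [if_neg hcp]
        have hne : ¬ (p = (max p.1 0, ((c : Nat) : Int))) := by
          intro h
          obtain ⟨a, b⟩ := p
          simp only [Prod.mk.injEq] at h
          omega
        simp [hne]
    · rw [if_neg hrp]
      simp only [List.getElem_map, List.getElem_range]
      refine congrArg _ (List.map_congr_left ?_)
      intro c hcmem
      simp only [List.mem_range] at hcmem
      have hne : ¬ (p = ((r : Int), (c : Int))) := by
        intro h
        obtain ⟨a, b⟩ := p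
        simp only [Prod.mk.injEq] at h
        omega
      simp [hne]
  · rw [if_neg hb]
    apply pvGrid_congr
    intro r hr c hc
    have hne : ¬ (p = ((r : Int), (c : Int))) := by
      intro h
      obtain ⟨a, b⟩ := p
      simp only [Prod.mk.injEq] at h
      simp only [not_and, not_lt] at hb
      omega
    simp [hne]

theorem pvGrid_foldl (n n_rows : Int) (L : List (Int × Int)) (f : Nat → Nat → Bool) :
    L.foldl (fun g p =>
        if 0 ≤ p.1 ∧ p.1 < n_rows ∧ 0 ≤ p.2 ∧ p.2 < n - 1 then
          g.set p.1.toNat ((g.getD p.1.toNat []).set (p.2.toNat + 1) "---|")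
        else g) (pvGrid n n_rows f)
      = pvGrid n n_rows (fun r c => f r c || decide (((r : Int), (c : Int)) ∈ L)) := by
  induction L generalizing f with
  | nil =>
    simp only [List.foldl_nil]
    apply pvGrid_congr
    intro r _ c _
    simp
  | cons p L ih =>
    simp only [List.foldl_cons]
    rw [pvGrid_stamp, ih]
    apply pvGrid_congr
    intro r _ c _
    rw [Bool.eq_iff_iff]
    simp only [List.mem_cons, Bool.or_assoc, Bool.or_eq_true, decide_eq_true_eq]
    tauto

-- A's per-row membership test equals plain membership in rungs
theorem pvRowMem (rungs : List (Int × Int)) (row col : Int) :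
    PySem.Set.contains
      (PySem.Set.ofList (((PySem.Set.ofList rungs).filter (fun p => p.1 == row)).map (fun p => p.2))) col
      = decide ((row, col) ∈ rungs) := by
  by_cases hm : (row, col) ∈ rungs
  · rw [decide_eq_true hm, PySem.Set.contains_iff, PySem.Set.mem_ofList]
    refine List.mem_map.mpr ⟨(row, col), ?_, rfl⟩
    rw [List.mem_filter]
    exact ⟨(PySem.Set.mem_ofList _ _).mpr hm, by simp⟩
  · rw [decide_eq_false hm, Bool.eq_false_iff]
    intro h
    rw [PySem.Set.contains_iff, PySem.Set.mem_ofList] at h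
    obtain ⟨p, hp, hpc⟩ := List.mem_map.mp h
    rw [List.mem_filter] at hp
    obtain ⟨hpm, hpr⟩ := hp
    apply hm
    have : p = (row, col) := by
      obtain ⟨a, b⟩ := p
      simp only [beq_iff_eq] at hpr
      simp_all
    rw [← this]
    exact (PySem.Set.mem_ofList _ _).mp hpm

-- ===== VERDICT (by name: the statement is the Claim_ definition above) =====
theorem format_ladder_spec : Claim_equal_format_ladder := by
  intro n n_rows rungs col_labels _
  show format_ladder n n_rows rungs col_labels = format_ladder_alt n n_rows rungs col_labels
  unfold format_ladder format_ladder_alt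
  simp only []
  rw [pvGrid_zero, pvGrid_foldl]
  refine congrArg _ ?_
  congr 1
  congr 1
  -- body lines agree
  rw [PySem.List.pyRange_one (a := 0) (b := n_rows)]
  unfold pvGrid
  rw [List.map_map, List.map_map]
  simp only [sub_zero]
  refine List.map_congr_left ?_
  intro r _
  simp only [Function.comp_apply, zero_add]
  refine congrArg _ ?_
  refine congrArg _ ?_
  rw [PySem.List.pyRange_one (a := 0) (b := n - 1), List.map_map]
  simp only [sub_zero]
  refine List.map_congr_left ?_
  intro c _
  simp only [Function.comp_apply, zero_add]
  rw [pvRowMem]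
  simp
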